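-- pv_equiv track=rewrite | github.com/quochuyyy1839/go1-challenge | learners-and-courses/main.py | find_courses_completed_by_single_learner
-- ===== SOURCE A (Python) =====
-- def find_courses_completed_by_single_learner(data):
--     # Create a dictionary to store the number of learners who have completed each course
--     course_learners = {}
--     for learner, courses in data.items():
--         for course in courses:
--             if course in course_learners:
--                 course_learners[course].add(learner)
--             else:
--                 course_learners[course] = {learner}
--
--     # Filter out courses completed by only one learner
--     single_learner_courses = [course for course, learners in course_learners.items() if len(learners) == 1]
--
--     return single_learner_courses
-- ===== SOURCE B (Python) =====
-- def find_courses_completed_by_single_learner(data):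
--     # One pass keeping only the single credited learner per course plus a set of
--     # courses already known to have two distinct learners.
--     seen_once = {}
--     seen_multiple = set()
--     for learner, courses in data.items():
--         for course in courses:
--             if course in seen_multiple:
--                 continue
--             elif course in seen_once:
--                 if seen_once[course] != learner:
--                     seen_multiple.add(course)
--             else:
--                 seen_once[course] = learner
--     return [course for course in seen_once if course not in seen_multiple]
-- ===== Notes on version B (the rewrite author's own statement) =====
-- stated objective: alternative
-- what changed: Instead of building a dict of per-course learner sets and filtering by set size afterwards, B keeps in one pass only the single credited learner per course (seen_once) plus a set of courses already known to have two distinct learners (seen_multiple), and reads the answer off that O(1)-per-course state.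
import Mathlib
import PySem

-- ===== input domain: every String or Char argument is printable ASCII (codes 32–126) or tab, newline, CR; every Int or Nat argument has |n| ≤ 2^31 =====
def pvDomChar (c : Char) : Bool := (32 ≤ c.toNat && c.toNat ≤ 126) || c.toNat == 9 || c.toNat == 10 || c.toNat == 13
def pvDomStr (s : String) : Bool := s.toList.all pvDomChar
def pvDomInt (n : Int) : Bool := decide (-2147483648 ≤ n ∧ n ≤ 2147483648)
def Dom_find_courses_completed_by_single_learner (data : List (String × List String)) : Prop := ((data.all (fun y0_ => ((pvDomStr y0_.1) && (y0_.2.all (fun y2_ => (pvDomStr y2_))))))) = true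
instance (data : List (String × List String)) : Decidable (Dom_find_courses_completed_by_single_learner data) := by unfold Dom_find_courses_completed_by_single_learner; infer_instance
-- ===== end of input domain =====

-- B replaces A's per-course learner sets by an O(1)-per-course state: the single credited
-- learner per course plus the set of courses already known to have ≥2 distinct learners.

-- ===== PORT A =====
-- inner loop body of A: one (learner, course) pair updating the dict of learner sets
def pvAStep (learner : String) (d : PySem.Dict String (PySem.Set String)) (course : String) :
    PySem.Dict String (PySem.Set String) :=
  if d.contains course then
    d.insert course (PySem.Set.add (d.getD course []) learner)   -- course_learners[course].add(learner)
  else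
    d.insert course (PySem.Set.ofList [learner])                 -- course_learners[course] = {learner}

def find_courses_completed_by_single_learner (data : List (String × List String)) : List String :=
  let course_learners :=
    data.foldl (fun d p => p.2.foldl (pvAStep p.1) d) PySem.Dict.empty
  (course_learners.items.filter (fun q => q.2.length == 1)).map Prod.fst

-- ===== PORT B =====
-- one (learner, course) pair updating (seen_once, seen_multiple)
def pvBStep (learner : String) (st : PySem.Dict String String × PySem.Set String)
    (course : String) : PySem.Dict String String × PySem.Set String :=
  if PySem.Set.contains st.2 course then st
  else
    match st.1.get? course with
    | some l => if l ≠ learner then (st.1, PySem.Set.add st.2 course) else st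
    | none => (st.1.insert course learner, st.2)

def find_courses_completed_by_single_learner_alt (data : List (String × List String)) : List String :=
  let st := data.foldl (fun st p => p.2.foldl (pvBStep p.1) st)
    (PySem.Dict.empty, PySem.Set.empty)
  st.1.keys.filter (fun c => !(PySem.Set.contains st.2 c))

-- ===== PRECONDITION & SPEC =====
def Spec_find_courses_completed_by_single_learner (data : List (String × List String)) (out : List String) : Prop := out = find_courses_completed_by_single_learner_alt data
instance (data : List (String × List String)) (out : List String) : Decidable (Spec_find_courses_completed_by_single_learner data out) := by unfold Spec_find_courses_completed_by_single_learner; infer_instance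

-- ===== CLAIM (what is proved, stated in full; the proofs are below) =====
def Claim_equal_find_courses_completed_by_single_learner : Prop := ∀ (data : List (String × List String)), Dom_find_courses_completed_by_single_learner data → Spec_find_courses_completed_by_single_learner data (find_courses_completed_by_single_learner data)

-- ===== LEMMAS AND PROOFS =====


-- Set facts specific to the two-element sets these programs build
theorem pvContains_add (s : PySem.Set String) (x c : String) :
    PySem.Set.contains (PySem.Set.add s x) c = true ↔ c = x ∨ PySem.Set.contains s c = true := by
  simp only [PySem.Set.contains, PySem.Set.add, List.contains_eq_mem, decide_eq_true_eq]
  split <;> simp <;> aesop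

theorem pvLen_add (s : PySem.Set String) (x : String) : s.length ≤ (PySem.Set.add s x).length := by
  simp only [PySem.Set.add]; split <;> simp

-- The loop invariant tying A's dict of learner sets to B's (seen_once, seen_multiple).
def pvInv (d : PySem.Dict String (PySem.Set String)) (once : PySem.Dict String String)
    (multi : PySem.Set String) : Prop :=
  d.keys = once.keys ∧ d.keys.Nodup ∧
  (∀ c, PySem.Set.contains multi c = true → ∃ s, d.get? c = some s ∧ 2 ≤ s.length) ∧
  (∀ c l, once.get? c = some l → PySem.Set.contains multi c = false → d.get? c = some [l])

theorem pvInv_empty : pvInv PySem.Dict.empty PySem.Dict.empty PySem.Set.empty := by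
  refine ⟨rfl, ?_, ?_, ?_⟩
  · simp [pysem]
  · intro c h; simp [PySem.Set.empty, PySem.Set.contains] at h
  · intro c l h; simp [pysem] at h

theorem pvInv_step (learner course : String) (d : PySem.Dict String (PySem.Set String))
    (once : PySem.Dict String String) (multi : PySem.Set String) (h : pvInv d once multi) :
    pvInv (pvAStep learner d course) (pvBStep learner (once, multi) course).1
      (pvBStep learner (once, multi) course).2 := by
  obtain ⟨hk, hnd, h3, h4⟩ := h
  by_cases hm : PySem.Set.contains multi course = true
  · -- course already known multiple: B skips, A enlarges the set at course
    obtain ⟨s, hs, hlen⟩ := h3 course hm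
    have hc : d.contains course = true := by
      rw [PySem.Dict.contains_eq_isSome_get?, hs]; rfl
    have hgd : d.getD course [] = s := PySem.Dict.getD_of_get?_eq_some _ _ hs
    simp only [pvBStep, hm, if_true, pvAStep, hc, hgd]
    refine ⟨by rw [PySem.Dict.keys_insert_of_contains _ _ hc]; exact hk,
            by rw [PySem.Dict.keys_insert_of_contains _ _ hc]; exact hnd, ?_, ?_⟩
    · intro c hcm
      rcases eq_or_ne c course with rfl | hne
      · exact ⟨_, PySem.Dict.get?_insert_self _ _ _,
          le_trans hlen (pvLen_add s learner)⟩
      · rw [PySem.Dict.get?_insert_of_ne _ _ hne]; exact h3 c hcm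
    · intro c l hoc hcm
      have hne : c ≠ course := by rintro rfl; rw [hm] at hcm; cases hcm
      rw [PySem.Dict.get?_insert_of_ne _ _ hne]; exact h4 c l hoc hcm
  · have hm' : PySem.Set.contains multi course = false := by
      cases hcc : PySem.Set.contains multi course
      · rfl
      · exact absurd hcc hm
    match ho : once.get? course with
    | some l =>
      have hd : d.get? course = some [l] := h4 course l ho hm'
      have hc : d.contains course = true := by
        rw [PySem.Dict.contains_eq_isSome_get?, hd]; rfl
      have hgd : d.getD course [] = [l] := PySem.Dict.getD_of_get?_eq_some _ _ hd
      have hkeys : (d.insert course (PySem.Set.add [l] learner)).keys = once.keys := by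
        rw [PySem.Dict.keys_insert_of_contains _ _ hc]; exact hk
      by_cases hl : l = learner
      · -- same learner again: both sides are (observationally) unchanged
        subst hl
        have hadd : PySem.Set.add [l] l = [l] := by
          simp [PySem.Set.add, PySem.Set.contains]
        simp only [pvBStep, hm, if_false, Bool.false_eq_true, ho, ne_eq,
          not_true_eq_false, if_false, pvAStep, hc, if_true, hgd, hadd]
        refine ⟨by rw [PySem.Dict.keys_insert_of_contains _ _ hc]; exact hk, ?_, ?_, ?_⟩
        · rw [PySem.Dict.keys_insert_of_contains _ _ hc]; exact hnd
        · intro c hcm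
          have hne : c ≠ course := by rintro rfl; rw [hcm] at hm'; cases hm'
          rw [PySem.Dict.get?_insert_of_ne _ _ hne]; exact h3 c hcm
        · intro c l' hoc hcm
          rcases eq_or_ne c course with rfl | hne
          · rw [ho] at hoc; cases hoc
            exact PySem.Dict.get?_insert_self _ _ _
          · rw [PySem.Dict.get?_insert_of_ne _ _ hne]; exact h4 c l' hoc hcm
      · -- a second distinct learner: A's set gets size 2, B promotes to seen_multiple
        simp only [pvBStep, hm, Bool.false_eq_true, if_false, ho, ne_eq, hl,
          not_false_eq_true, if_true, pvAStep, hc, hgd]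
        refine ⟨by rw [PySem.Dict.keys_insert_of_contains _ _ hc]; exact hk,
                by rw [PySem.Dict.keys_insert_of_contains _ _ hc]; exact hnd, ?_, ?_⟩
        · intro c hcm
          rcases eq_or_ne c course with rfl | hne
          · refine ⟨_, PySem.Dict.get?_insert_self _ _ _, ?_⟩
            have : PySem.Set.add [l] learner = [l, learner] := by
              simp [PySem.Set.add, PySem.Set.contains, Ne.symm hl]
            rw [this]; simp
          · rw [PySem.Dict.get?_insert_of_ne _ _ hne]
            rcases (pvContains_add multi course c).mp hcm with rfl | hcm'
            · exact absurd rfl hne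
            · exact h3 c hcm'
        · intro c l' hoc hcm
          have hne : c ≠ course := by
            rintro rfl
            have : PySem.Set.contains (PySem.Set.add multi c) c = true :=
              (pvContains_add multi c c).mpr (Or.inl rfl)
            rw [this] at hcm; cases hcm
          have hcm0 : PySem.Set.contains multi c = false := by
            cases hcc : PySem.Set.contains multi c
            · rfl
            · exfalso
              have hmm : PySem.Set.contains (PySem.Set.add multi course) c = true :=
                (pvContains_add multi course c).mpr (Or.inr hcc)
              rw [hmm] at hcm; cases hcm
          rw [PySem.Dict.get?_insert_of_ne _ _ hne]; exact h4 c l' hoc hcm0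
    | none =>
      -- fresh course: both sides append it
      have hnmem : course ∉ once.keys := (PySem.Dict.get?_eq_none_iff_not_mem_keys _ _).mp ho
      have hdnone : d.get? course = none :=
        (PySem.Dict.get?_eq_none_iff_not_mem_keys _ _).mpr (hk ▸ hnmem)
      have hc : d.contains course = false := by
        rw [PySem.Dict.contains_eq_isSome_get?, hdnone]; rfl
      have hoc : once.contains course = false := by
        rw [PySem.Dict.contains_eq_isSome_get?, ho]; rfl
      simp only [pvBStep, hm, Bool.false_eq_true, if_false, ho, pvAStep, hc]
      refine ⟨?_, ?_, ?_, ?_⟩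
      · rw [PySem.Dict.keys_insert_of_not_contains _ _ hc,
            PySem.Dict.keys_insert_of_not_contains _ _ hoc, hk]
      · rw [PySem.Dict.keys_insert_of_not_contains _ _ hc]
        have hdn : course ∉ d.keys := fun ha => hnmem (hk ▸ ha)
        rw [List.nodup_append]
        refine ⟨hnd, List.nodup_singleton _, ?_⟩
        intro a ha b hb
        rw [List.mem_singleton] at hb
        subst hb
        exact fun hab => hdn (hab ▸ ha)
      · intro c hcm
        obtain ⟨s, hs, hlen⟩ := h3 c hcm
        have hne : c ≠ course := by rintro rfl; rw [hdnone] at hs; cases hs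
        rw [PySem.Dict.get?_insert_of_ne _ _ hne]; exact ⟨s, hs, hlen⟩
      · intro c l' hoc' hcm
        rcases eq_or_ne c course with rfl | hne
        · rw [PySem.Dict.get?_insert_self] at hoc'
          cases hoc'
          have : PySem.Set.ofList [learner] = [learner] := rfl
          rw [this]
          exact PySem.Dict.get?_insert_self _ _ _
        · rw [PySem.Dict.get?_insert_of_ne _ _ hne] at hoc' ⊢
          exact h4 c l' hoc' hcm

theorem pvInv_courses (learner : String) (courses : List String)
    (d : PySem.Dict String (PySem.Set String)) (once : PySem.Dict String String)
    (multi : PySem.Set String) (h : pvInv d once multi) :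
    pvInv (courses.foldl (pvAStep learner) d)
      (courses.foldl (pvBStep learner) (once, multi)).1
      (courses.foldl (pvBStep learner) (once, multi)).2 := by
  induction courses generalizing d once multi with
  | nil => exact h
  | cons c cs ih =>
    simpa using ih _ _ _ (pvInv_step learner c d once multi h)

theorem pvInv_fold (data : List (String × List String))
    (d : PySem.Dict String (PySem.Set String)) (once : PySem.Dict String String)
    (multi : PySem.Set String) (h : pvInv d once multi) :
    pvInv (data.foldl (fun d p => p.2.foldl (pvAStep p.1) d) d)
      (data.foldl (fun st p => p.2.foldl (pvBStep p.1) st) (once, multi)).1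
      (data.foldl (fun st p => p.2.foldl (pvBStep p.1) st) (once, multi)).2 := by
  induction data generalizing d once multi with
  | nil => exact h
  | cons p ps ih =>
    simpa using ih _ _ _ (pvInv_courses p.1 p.2 d once multi h)

theorem pvInv_extract (d : PySem.Dict String (PySem.Set String))
    (once : PySem.Dict String String) (multi : PySem.Set String) (h : pvInv d once multi) :
    (d.items.filter (fun q => q.2.length == 1)).map Prod.fst
      = once.keys.filter (fun c => !(PySem.Set.contains multi c)) := by
  obtain ⟨hk, hnd, h3, h4⟩ := h
  rw [PySem.Dict.items_eq_map_keys d hnd []]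
  rw [List.filter_map, List.map_map]
  have : ((fun q : String × PySem.Set String => q.2.length == 1) ∘
      fun k => (k, d.getD k [])) = fun k => (d.getD k []).length == 1 := rfl
  rw [this]
  have : (Prod.fst ∘ fun k : String => (k, d.getD k [])) = id := rfl
  rw [this, List.map_id, hk]
  apply List.filter_congr
  intro c hc
  have hmem : c ∈ once.keys := hc
  obtain ⟨l, hl⟩ : ∃ l, once.get? c = some l := by
    cases ho : once.get? c with
    | none => exact absurd hmem ((PySem.Dict.get?_eq_none_iff_not_mem_keys _ _).mp ho)
    | some l => exact ⟨l, rfl⟩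
  cases hcm : PySem.Set.contains multi c with
  | false =>
    have hd := h4 c l hl hcm
    rw [PySem.Dict.getD_of_get?_eq_some _ _ hd]
    rfl
  | true =>
    obtain ⟨s, hs, hlen⟩ := h3 c hcm
    rw [PySem.Dict.getD_of_get?_eq_some _ _ hs]
    simp only [Bool.not_true]
    have : s.length ≠ 1 := by omega
    simp [this]

-- ===== VERDICT (by name: the statement is the Claim_ definition above) =====
theorem find_courses_completed_by_single_learner_spec : Claim_equal_find_courses_completed_by_single_learner := by
  intro data _
  unfold Spec_find_courses_completed_by_single_learner
  unfold find_courses_completed_by_single_learner find_courses_completed_by_single_learner_alt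
  exact pvInv_extract _ _ _ (pvInv_fold data _ _ _ pvInv_empty)
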